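-- pv_equiv track=rewrite | github.com/thgilartlu/aoc | 2023/day1/main.py | spellDigits
-- ===== SOURCE A (Python) =====
-- def spellDigits(line, digit_map):
--     words = line.split()
--     processed_words = []
--
--     for word in words:
--         processed_word = ''
--         while word:
--             match_found = False
--             for digit_word, digit in digit_map.items():
--                 if word.startswith(digit_word):
--                     processed_word += digit
--                     word = word[len(digit_word):]
--                     match_found = True
--                     break
--             if not match_found:
--                 processed_word += word[0]
--                 word = word[1:]
--         processed_words.append(processed_word)
--
--     return ''.join(processed_words)
-- ===== SOURCE B (Python) =====
-- def spellDigits(line, digit_map):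
--     # usable patterns: non-empty keys without whitespace (others can never
--     # match inside a whitespace-delimited word; an empty key would not let
--     # the scan advance)
--     keys = [(k, v) for k, v in digit_map.items()
--             if k and not any(c.isspace() for c in k)]
--     res = ''
--     i, n = 0, len(line)
--     while i < n:
--         c = line[i]
--         if c.isspace():
--             i += 1
--             continue
--         for k, v in keys:
--             if line.startswith(k, i):
--                 res += v
--                 i += len(k)
--                 break
--         else:
--             res += c
--             i += 1
--     return res
-- ===== Notes on version B (the rewrite author's own statement) =====
-- stated objective: simpler
-- what changed: B drops A's split-into-words outer loop and repeated string slicing: it prefilters digit_map once to the keys that can ever match (non-empty, no whitespace) and does a single index-based left-to-right scan of the whole line, skipping whitespace inline and appending to one result string.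
import Mathlib
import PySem

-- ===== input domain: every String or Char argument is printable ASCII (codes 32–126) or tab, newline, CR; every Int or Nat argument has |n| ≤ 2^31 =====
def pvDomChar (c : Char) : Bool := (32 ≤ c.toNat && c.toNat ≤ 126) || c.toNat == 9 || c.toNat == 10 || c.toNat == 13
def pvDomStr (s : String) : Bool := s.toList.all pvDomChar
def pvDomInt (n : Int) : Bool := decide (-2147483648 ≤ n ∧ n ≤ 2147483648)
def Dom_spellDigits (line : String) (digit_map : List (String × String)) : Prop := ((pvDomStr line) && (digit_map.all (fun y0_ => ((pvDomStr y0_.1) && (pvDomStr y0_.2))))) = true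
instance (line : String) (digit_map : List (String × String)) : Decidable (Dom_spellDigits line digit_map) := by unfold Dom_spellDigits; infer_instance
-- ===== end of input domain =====

-- B replaces A's split-into-words / repeated-slicing loops by one left-to-right scan of
-- the whole line over a prefiltered pattern list (objective: simpler single pass; no speed claim).

-- ===== PORT A =====
-- the inner 'for digit_word, digit in …: if word.startswith(digit_word): … break' (for-else):
-- first pair whose key is a prefix of cs (shared by both ports: B has the same for-else)
def pvFindFirst (cs : List Char) (pairs : List (String × String)) : Option (String × String) :=
  match pairs with
  | [] => none
  | (k, v) :: rest => if k.toList.isPrefixOf cs then some (k, v) else pvFindFirst cs rest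

-- A's 'while word:' loop.  fuel bounds the number of iterations: when no key is empty each
-- iteration strictly shortens word, so fuel = |word| + 1 is enough; Python diverges exactly
-- where the fuel could run out (empty key, nonempty word), and Pre_ excludes those inputs.
def pvWhileA (fuel : Nat) (word : List Char) (pw : List Char) (dm : List (String × String)) : List Char :=
  match fuel, word with
  | 0, _ => pw
  | _ + 1, [] => pw
  | fuel + 1, c :: rest =>
    match pvFindFirst (c :: rest) dm with
    | some (k, v) => pvWhileA fuel ((c :: rest).drop k.toList.length) (pw ++ v.toList) dm
    | none => pvWhileA fuel rest (pw ++ [c]) dm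

def spellDigits (line : String) (digit_map : List (String × String)) : String :=
  let words := PySem.Chars.split₀ line.toList
  let processedWords := words.map (fun w => pvWhileA (w.length + 1) w [] digit_map)
  String.ofList (PySem.Chars.join [] processedWords)

-- ===== PORT B =====
-- '[(k, v) for k, v in digit_map.items() if k and not any(c.isspace() for c in k)]'
def pvKeysB (dm : List (String × String)) : List (String × String) :=
  dm.filter (fun kv => !kv.1.toList.isEmpty && !kv.1.toList.any PySem.Chars.isspace)

-- B's 'while i < n:' scan of the whole line; the remainder list plays the role of line[i:].
-- fuel = |line| is enough: every iteration consumes at least one character (kept keys are nonempty).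
def pvScanB (fuel : Nat) (cs : List Char) (keys : List (String × String)) (res : List Char) : List Char :=
  match fuel, cs with
  | 0, _ => res
  | _ + 1, [] => res
  | fuel + 1, c :: rest =>
    if PySem.Chars.isspace c then pvScanB fuel rest keys res
    else
      match pvFindFirst (c :: rest) keys with
      | some (k, v) => pvScanB fuel ((c :: rest).drop k.toList.length) keys (res ++ v.toList)
      | none => pvScanB fuel rest keys (res ++ [c])

def spellDigits_alt (line : String) (digit_map : List (String × String)) : String :=
  String.ofList (pvScanB line.toList.length line.toList (pvKeysB digit_map) [])

-- ===== PRECONDITION & SPEC =====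
-- Pre_ excludes only inputs on which the Python A never returns: with an empty-string key
-- the inner loop matches without consuming anything, so A loops forever on any line that
-- contains a word; lines with no word are kept even then (A returns '' on them).
def Pre_spellDigits (line : String) (digit_map : List (String × String)) : Prop :=
  "" ∈ digit_map.map Prod.fst → PySem.Chars.split₀ line.toList = []
instance (line : String) (digit_map : List (String × String)) : Decidable (Pre_spellDigits line digit_map) := by unfold Pre_spellDigits; infer_instance
def pvWitness_spellDigits : String × (List (String × String)) := ("one 2three", [("one", "1"), ("three", "3")])

def Spec_spellDigits (line : String) (digit_map : List (String × String)) (out : String) : Prop := out = spellDigits_alt line digit_map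
instance (line : String) (digit_map : List (String × String)) (out : String) : Decidable (Spec_spellDigits line digit_map out) := by unfold Spec_spellDigits; infer_instance

-- ===== CLAIM (what is proved, stated in full; the proofs are below) =====
def Claim_equal_spellDigits : Prop := ∀ (line : String) (digit_map : List (String × String)), Dom_spellDigits line digit_map → Pre_spellDigits line digit_map → Spec_spellDigits line digit_map (spellDigits line digit_map)

-- ===== LEMMAS AND PROOFS =====

def pvSplitSpec (cs : List Char) : List (List Char) :=
  match cs with
  | [] => []
  | c :: rest =>
    if PySem.Chars.isspace c then pvSplitSpec rest
    else (c :: rest.takeWhile (fun d => !PySem.Chars.isspace d)) :: pvSplitSpec (rest.dropWhile (fun d => !PySem.Chars.isspace d))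
termination_by cs.length
decreasing_by
  · simp
  · simpa using Nat.lt_succ_of_le (List.length_dropWhile_le _ rest)

lemma pv_find_mem {cs : List Char} {pairs : List (String × String)} {p : String × String}
    (h : pvFindFirst cs pairs = some p) : p ∈ pairs ∧ p.1.toList <+: cs := by
  induction pairs with
  | nil => simp [pvFindFirst] at h
  | cons q rest ih =>
    obtain ⟨k, v⟩ := q
    rw [pvFindFirst] at h
    split at h
    · rename_i hpref
      cases h
      exact ⟨List.mem_cons_self, List.isPrefixOf_iff_prefix.mp hpref⟩
    · obtain ⟨h1, h2⟩ := ih h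
      exact ⟨List.mem_cons_of_mem _ h1, h2⟩

lemma pv_keysB_ne (dm : List (String × String)) : ∀ p ∈ pvKeysB dm, p.1.toList ≠ [] := by
  intro p hp
  have := List.of_mem_filter hp
  simp at this
  intro hnil
  exact this.1 (String.toList_eq_nil_iff.mp hnil)

lemma pv_prefix_boundary {k w r : List Char}
    (hk : ∀ c ∈ k, PySem.Chars.isspace c = false)
    (hb : ∀ c, r.head? = some c → PySem.Chars.isspace c = true) :
    (k <+: w ++ r) ↔ (k <+: w) := by
  constructor
  · intro h
    by_cases hl : k.length ≤ w.length
    · exact List.prefix_of_prefix_length_le h (List.prefix_append w r) hl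
    · exfalso
      have hwk : w <+: k := List.prefix_of_prefix_length_le (List.prefix_append w r) h (by omega)
      obtain ⟨t, ht⟩ := hwk
      obtain ⟨s, hs⟩ := h
      rw [← ht, List.append_assoc] at hs
      have hts : t ++ s = r := List.append_cancel_left hs
      have htne : t ≠ [] := by
        intro h0; rw [h0] at ht; simp at ht; exact hl (le_of_eq (by rw [ht]))
      obtain ⟨c, t', rfl⟩ := List.exists_cons_of_ne_nil htne
      have hch : r.head? = some c := by rw [← hts]; rfl
      have := hb c hch
      have : PySem.Chars.isspace c = false := hk c (by rw [← ht]; simp)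
      simp_all
  · intro h
    exact h.trans (List.prefix_append w r)

lemma pv_find_filter (dm : List (String × String)) {w r : List Char}
    (hw : ∀ c ∈ w, PySem.Chars.isspace c = false)
    (hb : ∀ c, r.head? = some c → PySem.Chars.isspace c = true)
    (hne : ∀ p ∈ dm, p.1.toList ≠ []) :
    pvFindFirst (w ++ r) (pvKeysB dm) = pvFindFirst w dm := by
  induction dm with
  | nil => rfl
  | cons q rest ih =>
    obtain ⟨k, v⟩ := q
    have hrest : ∀ p ∈ rest, p.1.toList ≠ [] := fun p hp => hne p (List.mem_cons_of_mem _ hp)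
    have hkne : k.toList ≠ [] := hne (k, v) List.mem_cons_self
    rw [pvKeysB, List.filter_cons]
    by_cases hws : k.toList.any PySem.Chars.isspace = true
    · -- key contains whitespace: B filters it out; A can never match it against w
      have hA : k.toList.isPrefixOf w = false := by
        by_contra hcon
        have hpref : k.toList <+: w := List.isPrefixOf_iff_prefix.mp (by
          revert hcon; cases k.toList.isPrefixOf w <;> simp)
        obtain ⟨c, hc, hcs⟩ := List.any_eq_true.mp hws
        have := hw c (hpref.subset hc)
        simp_all
      rw [if_neg (by simp [hws])]
      rw [pvFindFirst, hA]
      simp only [Bool.false_eq_true, if_false]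
      exact ih hrest
    · -- key kept by B's filter
      have hkeep : (!k.toList.isEmpty && !k.toList.any PySem.Chars.isspace) = true := by
        simp [hws, hkne]
      rw [if_pos hkeep]
      have hknws : ∀ c ∈ k.toList, PySem.Chars.isspace c = false := by
        intro c hc
        cases h : PySem.Chars.isspace c
        · rfl
        · exact absurd (List.any_eq_true.mpr ⟨c, hc, h⟩) hws
      have heq : k.toList.isPrefixOf (w ++ r) = k.toList.isPrefixOf w := by
        cases h1 : k.toList.isPrefixOf (w ++ r) <;> cases h2 : k.toList.isPrefixOf w
        · rfl
        · exact absurd (List.isPrefixOf_iff_prefix.mpr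
            ((pv_prefix_boundary hknws hb).mpr (List.isPrefixOf_iff_prefix.mp h2))) (by simp [h1])
        · exact absurd (List.isPrefixOf_iff_prefix.mpr
            ((pv_prefix_boundary hknws hb).mp (List.isPrefixOf_iff_prefix.mp h1))) (by simp [h2])
        · rfl
      rw [pvFindFirst, pvFindFirst, heq]
      split
      · rfl
      · exact ih hrest

lemma pvWhileA_nil (f : Nat) (pw : List Char) (dm : List (String × String)) :
    pvWhileA f [] pw dm = pw := by cases f <;> rfl

lemma pvWhileA_acc : ∀ (f : Nat) (w pw : List Char) (dm : List (String × String)),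
    pvWhileA f w pw dm = pw ++ pvWhileA f w [] dm := by
  intro f
  induction f with
  | zero => intro w pw dm; simp [pvWhileA]
  | succ f ih =>
    intro w pw dm
    cases w with
    | nil => simp [pvWhileA_nil]
    | cons c rest =>
      rw [pvWhileA, pvWhileA]
      cases hf : pvFindFirst (c :: rest) dm with
      | none => simp only; rw [ih rest (pw ++ [c]), ih rest ([] ++ [c])]; simp
      | some p =>
        obtain ⟨k, v⟩ := p
        simp only
        rw [ih _ (pw ++ v.toList), ih _ ([] ++ v.toList)]
        simp

lemma pvWhileA_fuel (dm : List (String × String)) (hne : ∀ p ∈ dm, p.1.toList ≠ []) :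
    ∀ n w pw f₁ f₂, w.length ≤ n → w.length ≤ f₁ → w.length ≤ f₂ →
      pvWhileA f₁ w pw dm = pvWhileA f₂ w pw dm := by
  intro n
  induction n with
  | zero =>
    intro w pw f₁ f₂ hn _ _
    have : w = [] := List.length_eq_zero_iff.mp (Nat.le_zero.mp hn)
    subst this; rw [pvWhileA_nil, pvWhileA_nil]
  | succ n ih =>
    intro w pw f₁ f₂ hn h1 h2
    cases w with
    | nil => rw [pvWhileA_nil, pvWhileA_nil]
    | cons c rest =>
      simp only [List.length_cons] at hn h1 h2
      obtain ⟨g₁, rfl⟩ : ∃ g, f₁ = g + 1 := ⟨f₁ - 1, by omega⟩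
      obtain ⟨g₂, rfl⟩ : ∃ g, f₂ = g + 1 := ⟨f₂ - 1, by omega⟩
      rw [pvWhileA, pvWhileA]
      cases hf : pvFindFirst (c :: rest) dm with
      | none => exact ih rest (pw ++ [c]) g₁ g₂ (by omega) (by omega) (by omega)
      | some p =>
        obtain ⟨k, v⟩ := p
        simp only
        obtain ⟨hmem, hpref⟩ := pv_find_mem hf
        have hkne : k.toList ≠ [] := hne (k, v) hmem
        have hkl : 1 ≤ k.toList.length := by
          cases hk : k.toList with
          | nil => exact absurd hk hkne
          | cons a b => simp
        have hlen : ((c :: rest).drop k.toList.length).length = rest.length + 1 - k.toList.length := by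
          simp
        exact ih _ _ g₁ g₂ (by omega) (by omega) (by omega)

lemma pvScanB_fuel (keys : List (String × String)) (hne : ∀ p ∈ keys, p.1.toList ≠ []) :
    ∀ n cs res f₁ f₂, cs.length ≤ n → cs.length ≤ f₁ → cs.length ≤ f₂ →
      pvScanB f₁ cs keys res = pvScanB f₂ cs keys res := by
  intro n
  induction n with
  | zero =>
    intro cs res f₁ f₂ hn _ _
    have : cs = [] := List.length_eq_zero_iff.mp (Nat.le_zero.mp hn)
    subst this; cases f₁ <;> cases f₂ <;> rfl
  | succ n ih =>
    intro cs res f₁ f₂ hn h1 h2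
    cases cs with
    | nil => cases f₁ <;> cases f₂ <;> rfl
    | cons c rest =>
      simp only [List.length_cons] at hn h1 h2
      obtain ⟨g₁, rfl⟩ : ∃ g, f₁ = g + 1 := ⟨f₁ - 1, by omega⟩
      obtain ⟨g₂, rfl⟩ : ∃ g, f₂ = g + 1 := ⟨f₂ - 1, by omega⟩
      rw [pvScanB, pvScanB]
      by_cases hws : PySem.Chars.isspace c = true
      · rw [if_pos hws, if_pos hws]
        exact ih rest res g₁ g₂ (by omega) (by omega) (by omega)
      · rw [if_neg hws, if_neg hws]
        cases hf : pvFindFirst (c :: rest) keys with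
        | none => exact ih rest (res ++ [c]) g₁ g₂ (by omega) (by omega) (by omega)
        | some p =>
          obtain ⟨k, v⟩ := p
          simp only
          obtain ⟨hmem, hpref⟩ := pv_find_mem hf
          have hkne : k.toList ≠ [] := hne (k, v) hmem
          have hkl : 1 ≤ k.toList.length := by
            cases hk : k.toList with
            | nil => exact absurd hk hkne
            | cons a b => simp
          have hlen : ((c :: rest).drop k.toList.length).length = rest.length + 1 - k.toList.length := by
            simp
          exact ih _ _ g₁ g₂ (by omega) (by omega) (by omega)

lemma pv_scan_allws (keys : List (String × String)) :
    ∀ f cs res, (∀ c ∈ cs, PySem.Chars.isspace c = true) → pvScanB f cs keys res = res := by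
  intro f
  induction f with
  | zero => intro cs res _; rfl
  | succ f ih =>
    intro cs res hws
    cases cs with
    | nil => rfl
    | cons c rest =>
      rw [pvScanB, if_pos (hws c List.mem_cons_self)]
      exact ih rest res (fun d hd => hws d (List.mem_cons_of_mem _ hd))

lemma pv_go_eq (cs cur : List Char) (acc : List (List Char)) :
    PySem.Chars.split₀.go cs cur acc =
      acc.reverse ++ (if cur.isEmpty then pvSplitSpec cs
        else (cur.reverse ++ cs.takeWhile (fun d => !PySem.Chars.isspace d)) ::
          pvSplitSpec (cs.dropWhile (fun d => !PySem.Chars.isspace d))) := by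
  induction cs generalizing cur acc with
  | nil =>
    rw [PySem.Chars.split₀.go]
    cases cur with
    | nil => simp [pvSplitSpec]
    | cons a b => simp [pvSplitSpec]
  | cons c rest ih =>
    rw [PySem.Chars.split₀.go]
    by_cases hws : PySem.Chars.isspace c = true
    · rw [if_pos hws]
      cases cur with
      | nil =>
        rw [if_pos (by simp)]
        rw [ih [] acc]
        simp [pvSplitSpec, hws]
      | cons a b =>
        rw [if_neg (by simp)]
        rw [ih [] ((a :: b).reverse :: acc)]
        simp [pvSplitSpec, hws]
    · have hws' : PySem.Chars.isspace c = false := by simp_all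
      rw [if_neg (by simp [hws'])]
      rw [ih (c :: cur) acc]
      cases cur with
      | nil => simp [pvSplitSpec, hws']
      | cons a b => simp [hws']

lemma pv_split₀_eq (cs : List Char) : PySem.Chars.split₀ cs = pvSplitSpec cs := by
  simpa using pv_go_eq cs [] []

lemma pv_split_nil_allws : ∀ {cs : List Char}, pvSplitSpec cs = [] →
    ∀ c ∈ cs, PySem.Chars.isspace c = true := by
  intro cs
  induction cs with
  | nil => intro _ c hc; simp at hc
  | cons c rest ih =>
    intro h d hd
    rw [pvSplitSpec] at h
    by_cases hws : PySem.Chars.isspace c = true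
    · rw [if_pos hws] at h
      rcases List.mem_cons.mp hd with rfl | hd'
      · exact hws
      · exact ih h d hd'
    · rw [if_neg hws] at h
      simp at h

lemma pv_head_dropWhile (p : Char → Bool) (l : List Char) (c : Char)
    (h : (l.dropWhile p).head? = some c) : p c = false := by
  induction l with
  | nil => simp at h
  | cons a t ih =>
    rw [List.dropWhile_cons] at h
    by_cases hp : p a = true
    · simp [hp] at h; exact ih h
    · simp [hp] at h; rw [← h]; simpa using hp

lemma pv_join_cons (a : List Char) (l : List (List Char)) :
    PySem.Chars.join [] (a :: l) = a ++ PySem.Chars.join [] l := by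
  cases l with
  | nil => rw [PySem.Chars.join_singleton, PySem.Chars.join_nil, List.append_nil]
  | cons b t => rw [PySem.Chars.join_cons_cons]; simp

lemma pv_word (dm : List (String × String)) (hne : ∀ p ∈ dm, p.1.toList ≠ []) :
    ∀ n w r res, w.length ≤ n → (∀ c ∈ w, PySem.Chars.isspace c = false) →
      (∀ c, r.head? = some c → PySem.Chars.isspace c = true) →
      pvScanB (w ++ r).length (w ++ r) (pvKeysB dm) res
        = pvScanB r.length r (pvKeysB dm) (res ++ pvWhileA (w.length + 1) w [] dm) := by
  intro n
  induction n with
  | zero =>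
    intro w r res hn _ _
    have : w = [] := List.length_eq_zero_iff.mp (Nat.le_zero.mp hn)
    subst this
    simp [pvWhileA_nil]
  | succ n ih =>
    intro w r res hn hw hb
    cases w with
    | nil => simp [pvWhileA_nil]
    | cons c w' =>
      have hcw : PySem.Chars.isspace c = false := hw c List.mem_cons_self
      rw [List.cons_append, List.length_cons, pvScanB, if_neg (by simp [hcw])]
      rw [← List.cons_append, pv_find_filter dm hw hb hne]
      cases hf : pvFindFirst (c :: w') dm with
      | none =>
        simp only
        -- A side: one step of the while loop
        have hA : pvWhileA ((c :: w').length + 1) (c :: w') [] dm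
            = [c] ++ pvWhileA (w'.length + 1) w' [] dm := by
          rw [pvWhileA, hf]
          simp only [List.length_cons]
          rw [pvWhileA_acc]
          rfl
        have := ih w' r (res ++ [c]) (by simp only [List.length_cons] at hn; omega)
          (fun d hd => hw d (List.mem_cons_of_mem _ hd)) hb
        rw [this, hA]
        simp
      | some p =>
        obtain ⟨k, v⟩ := p
        simp only
        obtain ⟨hmem, hpref⟩ := pv_find_mem hf
        have hkne : k.toList ≠ [] := hne (k, v) hmem
        have hkl1 : 1 ≤ k.toList.length := by
          cases hk : k.toList with
          | nil => exact absurd hk hkne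
          | cons a b => simp
        have hklw : k.toList.length ≤ w'.length + 1 := by simpa using hpref.length_le
        have hlend : ((c :: w').drop k.toList.length).length = w'.length + 1 - k.toList.length := by
          simp
        have hdrop : ((c :: w') ++ r).drop k.toList.length = (c :: w').drop k.toList.length ++ r :=
          List.drop_append_of_le_length (by simpa using hklw)
        rw [List.cons_append, ← List.cons_append, hdrop]
        -- reset B's fuel to the canonical length
        have hfuel := pvScanB_fuel (pvKeysB dm) (pv_keysB_ne dm)
          (((c :: w').drop k.toList.length ++ r).length)
          ((c :: w').drop k.toList.length ++ r) (res ++ v.toList)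
          ((w' ++ r).length) (((c :: w').drop k.toList.length ++ r).length)
          le_rfl (by rw [List.length_append, List.length_append, hlend]; omega) le_rfl
        rw [hfuel]
        -- induction hypothesis on the shorter word
        have hw2 : ∀ d ∈ (c :: w').drop k.toList.length, PySem.Chars.isspace d = false :=
          fun d hd => hw d (List.drop_subset _ _ hd)
        have hn2 : ((c :: w').drop k.toList.length).length ≤ n := by
          rw [hlend]; simp only [List.length_cons] at hn; omega
        rw [ih _ r (res ++ v.toList) hn2 hw2 hb]
        -- A side
        have hA : pvWhileA ((c :: w').length + 1) (c :: w') [] dm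
            = v.toList ++ pvWhileA (((c :: w').drop k.toList.length).length + 1)
                ((c :: w').drop k.toList.length) [] dm := by
          rw [pvWhileA, hf]
          simp only [List.length_cons]
          rw [pvWhileA_acc]
          simp only [List.nil_append]
          congr 1
          exact pvWhileA_fuel dm hne (w'.length + 1) _ [] _ _
            (by rw [hlend]; omega) (by rw [hlend]; omega) (by rw [hlend]; omega)
        rw [hA]
        simp

lemma pv_main (dm : List (String × String)) (hne : ∀ p ∈ dm, p.1.toList ≠ []) :
    ∀ n cs res, cs.length ≤ n →
      pvScanB cs.length cs (pvKeysB dm) res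
        = res ++ PySem.Chars.join [] ((pvSplitSpec cs).map (fun w => pvWhileA (w.length + 1) w [] dm)) := by
  intro n
  induction n with
  | zero =>
    intro cs res hn
    have : cs = [] := List.length_eq_zero_iff.mp (Nat.le_zero.mp hn)
    subst this
    simp [pvScanB, pvSplitSpec, PySem.Chars.join_nil]
  | succ n ih =>
    intro cs res hn
    cases cs with
    | nil => simp [pvScanB, pvSplitSpec, PySem.Chars.join_nil]
    | cons c rest =>
      by_cases hws : PySem.Chars.isspace c = true
      · rw [List.length_cons, pvScanB, if_pos hws]
        rw [ih rest res (by simp only [List.length_cons] at hn; omega)]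
        rw [pvSplitSpec, if_pos hws]
      · have hws' : PySem.Chars.isspace c = false := by simp_all
        have hwr : (c :: rest.takeWhile (fun d => !PySem.Chars.isspace d))
            ++ rest.dropWhile (fun d => !PySem.Chars.isspace d) = c :: rest := by
          rw [List.cons_append, List.takeWhile_append_dropWhile]
        have hw : ∀ d ∈ c :: rest.takeWhile (fun d => !PySem.Chars.isspace d),
            PySem.Chars.isspace d = false := by
          intro d hd
          rcases List.mem_cons.mp hd with rfl | hd'
          · exact hws'
          · simpa using List.mem_takeWhile_imp hd'
        have hb : ∀ d, (rest.dropWhile (fun d => !PySem.Chars.isspace d)).head? = some d →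
            PySem.Chars.isspace d = true := by
          intro d hd
          simpa using pv_head_dropWhile _ rest d hd
        rw [← hwr]
        rw [pv_word dm hne (c :: rest.takeWhile (fun d => !PySem.Chars.isspace d)).length _ _ res
          le_rfl hw hb]
        rw [ih (rest.dropWhile (fun d => !PySem.Chars.isspace d)) _
          (by have := List.length_dropWhile_le (fun d => !PySem.Chars.isspace d) rest
              simp only [List.length_cons] at hn; omega)]
        rw [hwr, pvSplitSpec, if_neg (by simp [hws'])]
        rw [List.map_cons, pv_join_cons]
        simp

-- ===== VERDICT (by name: the statement is the Claim_ definition above) =====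
theorem spellDigits_spec : Claim_equal_spellDigits := by
  intro line dm _hdom hpre
  unfold Spec_spellDigits spellDigits spellDigits_alt
  by_cases hk : "" ∈ dm.map Prod.fst
  · have hsplit : PySem.Chars.split₀ line.toList = [] := hpre hk
    rw [pv_split₀_eq] at hsplit
    rw [pv_split₀_eq, hsplit]
    rw [pv_scan_allws _ _ _ _ (pv_split_nil_allws hsplit)]
    simp [PySem.Chars.join_nil]
  · have hne : ∀ p ∈ dm, p.1.toList ≠ [] := by
      intro p hp hnil
      exact hk (by
        have : p.1 = "" := String.toList_eq_nil_iff.mp hnil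
        exact this ▸ List.mem_map_of_mem hp)
    rw [pv_split₀_eq]
    rw [pv_main dm hne line.toList.length line.toList [] le_rfl]
    simp
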